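-- pv_equiv track=rewrite | github.com/hoangpnhat/OpsBot | app/chatbot/agents/actions.py | get_external_tools
-- ===== SOURCE A (Python) =====
-- from typing import List, Tuple, Dict
-- from typing import List, Union, Dict
--
-- def get_external_tools(selected_tools: List[Dict], tool_info: Dict) -> List[Dict]:
--     """
--     This function takes a list of selected tools and filter the external tool,
--     only use ONE tool, but it can called multiple times.
--
--     Args:
--         selected_tools (List[Dict]): The list of tools which are selected by the LLM
--
--     Returns:
--         List[Dict]: The tool to be called (it is a List because it can be called multiple times)
--     """
--     external_tools = []
--     for tool in selected_tools:
--         tool_name = tool.get("name")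
--         meta_tool = tool_info.get(tool_name, None)
--         if not meta_tool:
--             continue
--         if meta_tool.get("function", None):
--             external_tools.append(tool)
--
--
--     if len(external_tools) == 0 or len(external_tools) == 1:
--         return external_tools
--     else:
--         # only get the first external tool
--         multiple_tool_calls = []
--         first_tool = external_tools[0]
--         multiple_tool_calls.append(first_tool)
--         for tool in external_tools[1:]:
--             if tool['name'] == first_tool['name']:
--                 multiple_tool_calls.append(tool)
--         return multiple_tool_calls
-- ===== SOURCE B (Python) =====
-- def get_external_tools(selected_tools, tool_info):
--     # Group external tools by name in one pass; the answer is the first group (or []).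
--     groups = {}
--     for tool in selected_tools:
--         meta = tool_info.get(tool.get("name"))
--         if meta and meta.get("function"):
--             groups.setdefault(tool["name"], []).append(tool)
--     return next(iter(groups.values()), [])
-- ===== Notes on version B (the rewrite author's own statement) =====
-- stated objective: simpler
-- what changed: B replaces A's two-phase filter-then-rescan (build external list, branch on 0/1/many, rescan tail for the first name) with a single pass that groups external tools by name into an insertion-ordered dict and returns the first group (or []), which subsumes all three of A's branches.
import Mathlib
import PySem

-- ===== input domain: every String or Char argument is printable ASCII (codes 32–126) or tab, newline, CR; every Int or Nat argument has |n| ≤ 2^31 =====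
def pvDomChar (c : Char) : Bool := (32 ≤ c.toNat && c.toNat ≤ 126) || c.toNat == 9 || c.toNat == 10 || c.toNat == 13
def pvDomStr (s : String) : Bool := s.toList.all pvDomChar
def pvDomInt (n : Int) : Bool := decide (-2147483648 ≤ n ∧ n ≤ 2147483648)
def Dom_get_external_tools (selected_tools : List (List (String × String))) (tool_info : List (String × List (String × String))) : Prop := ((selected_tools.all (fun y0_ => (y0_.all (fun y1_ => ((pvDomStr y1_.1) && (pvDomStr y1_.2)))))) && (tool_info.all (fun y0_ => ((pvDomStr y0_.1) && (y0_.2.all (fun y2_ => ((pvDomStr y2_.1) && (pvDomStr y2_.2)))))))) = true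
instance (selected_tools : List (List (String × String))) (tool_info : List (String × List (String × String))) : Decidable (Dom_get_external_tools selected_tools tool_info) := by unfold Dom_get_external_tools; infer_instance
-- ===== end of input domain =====

-- B builds the answer in one pass by grouping external tools by name into an
-- insertion-ordered dict and returning the first group; equivalence of the return
-- value with A's filter-then-rescan is proved (objective: simpler).

-- ===== PORT A =====
-- loop body of A's first 'for' (tool.get / tool_info.get / truthiness tests, in A's order)
def pvStepA (tool_info : List (String × List (String × String)))
    (acc : List (List (String × String))) (tool : List (String × String)) :
    List (List (String × String)) :=
  match List.lookup "name" tool with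
  | none => acc                         -- tool_info.get(None) is None -> continue
  | some tool_name =>
    match List.lookup tool_name tool_info with
    | none => acc                       -- meta_tool is None -> continue
    | some meta_tool =>
      if meta_tool.isEmpty then acc     -- 'not meta_tool' (empty dict is falsy) -> continue
      else
        match List.lookup "function" meta_tool with
        | none => acc                   -- meta_tool.get("function", None) is None -> falsy
        | some fv => if fv == "" then acc else acc ++ [tool]   -- empty string is falsy

-- A's second phase: the 0/1 branch, else keep first tool's repeated calls
def pvPhase2 (external_tools : List (List (String × String))) : List (List (String × String)) :=
  if external_tools.length == 0 || external_tools.length == 1 then external_tools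
  else
    match external_tools with
    | [] => []
    | first :: _ =>
      -- external_tools[1:] is List.drop 1; tool['name'] == first['name'] compared as options
      (external_tools.drop 1).foldl
        (fun acc tool =>
          if List.lookup "name" tool == List.lookup "name" first then acc ++ [tool] else acc)
        [first]

def get_external_tools (selected_tools : List (List (String × String))) (tool_info : List (String × List (String × String))) : List (List (String × String)) :=
  pvPhase2 (selected_tools.foldl (pvStepA tool_info) [])

-- ===== PORT B =====
-- loop body of B's 'for': same truthiness tests, then groups.setdefault(name, []).append(tool)
def pvStepB (tool_info : List (String × List (String × String)))
    (groups : PySem.Dict String (List (List (String × String)))) (tool : List (String × String)) :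
    PySem.Dict String (List (List (String × String))) :=
  match List.lookup "name" tool with
  | none => groups
  | some tool_name =>
    match List.lookup tool_name tool_info with
    | none => groups
    | some meta_d =>
      if meta_d.isEmpty then groups
      else
        match List.lookup "function" meta_d with
        | none => groups
        | some fv =>
          if fv == "" then groups
          else groups.modify tool_name [] (fun v => v ++ [tool])  -- setdefault + append

-- next(iter(groups.values()), [])
def pvFirstGroup (groups : PySem.Dict String (List (List (String × String)))) : List (List (String × String)) :=
  match groups.items.head? with
  | some kv => kv.2
  | none => []

def get_external_tools_alt (selected_tools : List (List (String × String))) (tool_info : List (String × List (String × String))) : List (List (String × String)) :=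
  pvFirstGroup (selected_tools.foldl (pvStepB tool_info) PySem.Dict.empty)

-- ===== PRECONDITION & SPEC =====
def Spec_get_external_tools (selected_tools : List (List (String × String))) (tool_info : List (String × List (String × String))) (out : List (List (String × String))) : Prop := out = get_external_tools_alt selected_tools tool_info
instance (selected_tools : List (List (String × String))) (tool_info : List (String × List (String × String))) (out : List (List (String × String))) : Decidable (Spec_get_external_tools selected_tools tool_info out) := by unfold Spec_get_external_tools; infer_instance

-- ===== CLAIM (what is proved, stated in full; the proofs are below) =====
def Claim_equal_get_external_tools : Prop := ∀ (selected_tools : List (List (String × String))) (tool_info : List (String × List (String × String))), Dom_get_external_tools selected_tools tool_info → Spec_get_external_tools selected_tools tool_info (get_external_tools selected_tools tool_info)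

-- ===== LEMMAS AND PROOFS =====

-- the common filter condition: tool is an external tool
def pvExt (tool_info : List (String × List (String × String))) (tool : List (String × String)) : Bool :=
  match List.lookup "name" tool with
  | none => false
  | some n =>
    match List.lookup n tool_info with
    | none => false
    | some meta_d =>
      if meta_d.isEmpty then false
      else
        match List.lookup "function" meta_d with
        | none => false
        | some fv => !(fv == "")

def pvNm (tool : List (String × String)) : String := (List.lookup "name" tool).getD ""

def pvGStep (g : PySem.Dict String (List (List (String × String)))) (tool : List (String × String)) :
    PySem.Dict String (List (List (String × String))) :=
  g.modify (pvNm tool) [] (fun v => v ++ [tool])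

theorem pvStepA_eq (ti : List (String × List (String × String))) (acc : List (List (String × String))) (tool : List (String × String)) :
    pvStepA ti acc tool = if pvExt ti tool then acc ++ [tool] else acc := by
  unfold pvStepA pvExt
  repeat' split
  all_goals simp_all

theorem pvStepB_eq (ti : List (String × List (String × String))) (g : PySem.Dict String (List (List (String × String)))) (tool : List (String × String)) :
    pvStepB ti g tool = if pvExt ti tool then pvGStep g tool else g := by
  unfold pvStepB pvExt pvGStep pvNm
  repeat' split
  all_goals simp_all

theorem pvExt_lookup {ti : List (String × List (String × String))} {tool : List (String × String)}
    (h : pvExt ti tool = true) : List.lookup "name" tool = some (pvNm tool) := by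
  unfold pvExt at h
  cases h1 : List.lookup "name" tool with
  | none => rw [h1] at h; simp at h
  | some n => simp [pvNm, h1]

theorem pvHead_getD {g : PySem.Dict String (List (List (String × String)))} {k : String}
    {v : List (List (String × String))} (h : g.items.head? = some (k, v))
    (d0 : List (List (String × String))) : g.getD k d0 = v := by
  cases hg : g.items with
  | nil => rw [hg] at h; simp at h
  | cons a t =>
    rw [hg] at h
    simp only [List.head?_cons, Option.some_inj] at h
    subst h
    simp [PySem.Dict.getD, PySem.Dict.get?, hg]

theorem pvHead_insert {g : PySem.Dict String (List (List (String × String)))} {k : String}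
    {v : List (List (String × String))} (h : g.items.head? = some (k, v))
    (n : String) (w : List (List (String × String))) :
    ((g.insert n w).items.head?) = some (if n = k then (k, w) else (k, v)) := by
  cases hg : g.items with
  | nil => rw [hg] at h; simp at h
  | cons a t =>
    rw [hg] at h
    simp only [List.head?_cons, Option.some_inj] at h
    subst h
    by_cases hc : g.contains n = true
    · rw [PySem.Dict.items_insert_of_contains g w hc, hg]
      by_cases hk : n = k
      · simp [hk]
      · have hk' : k ≠ n := Ne.symm hk
        simp [hk, hk']
    · have hk : n ≠ k := by
        intro e; subst e
        exact hc (by simp [PySem.Dict.contains, hg])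
      rw [PySem.Dict.items_insert_of_not_contains g w (by simpa using hc), hg]
      simp [hk]

theorem pvHeadInv : ∀ (rest : List (List (String × String)))
    (g : PySem.Dict String (List (List (String × String)))) (k : String)
    (v : List (List (String × String))), g.items.head? = some (k, v) →
    ((rest.foldl pvGStep g).items.head? = some (k, v ++ rest.filter (fun t => pvNm t == k))) := by
  intro rest
  induction rest with
  | nil => intro g k v h; simpa using h
  | cons t r ih =>
    intro g k v h
    simp only [List.foldl_cons, List.filter_cons]
    by_cases hn : pvNm t = k
    · have hg : (pvGStep g t).items.head? = some (k, v ++ [t]) := by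
        have hgd : g.getD (pvNm t) [] = v := by rw [hn]; exact pvHead_getD h []
        have hi := pvHead_insert h (pvNm t) (v ++ [t])
        rw [hn] at hi
        simp only [pvGStep, PySem.Dict.modify, hgd]
        rw [hn]
        simpa using hi
      rw [ih _ _ _ hg]
      simp [hn]
    · have hg : (pvGStep g t).items.head? = some (k, v) := by
        have hi := pvHead_insert h (pvNm t) (g.getD (pvNm t) [] ++ [t])
        simpa [pvGStep, PySem.Dict.modify, hn] using hi
      rw [ih _ _ _ hg]
      simp [hn]

-- ===== VERDICT (by name: the statement is the Claim_ definition above) =====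
theorem get_external_tools_spec : Claim_equal_get_external_tools := by
  intro st ti _
  unfold Spec_get_external_tools get_external_tools get_external_tools_alt
  have hA : st.foldl (pvStepA ti) [] = st.filter (pvExt ti) := by
    have he : (pvStepA ti) = fun acc tool => if pvExt ti tool then acc ++ [tool] else acc := by
      funext acc tool; exact pvStepA_eq ti acc tool
    rw [he]
    simpa using PySem.List.foldl_append_if (pvExt ti) id st []
  have hB : st.foldl (pvStepB ti) PySem.Dict.empty
      = (st.filter (pvExt ti)).foldl pvGStep PySem.Dict.empty := by
    have he : (pvStepB ti) = fun g tool => if pvExt ti tool then pvGStep g tool else g := by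
      funext g tool; exact pvStepB_eq ti g tool
    rw [he, List.foldl_filter]
  rw [hA, hB]
  cases hE : st.filter (pvExt ti) with
  | nil => simp [pvPhase2, pvFirstGroup, PySem.Dict.empty]
  | cons f r =>
    have hgf : (pvGStep PySem.Dict.empty f).items.head? = some (pvNm f, [f]) := by
      simp [pvGStep, PySem.Dict.modify, PySem.Dict.insert, PySem.Dict.contains,
        PySem.Dict.getD, PySem.Dict.get?, PySem.Dict.empty]
    have hBval : pvFirstGroup (List.foldl pvGStep PySem.Dict.empty (f :: r))
        = f :: r.filter (fun t => pvNm t == pvNm f) := by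
      simp only [List.foldl_cons]
      rw [pvFirstGroup, pvHeadInv r _ _ _ hgf]
      simp
    rw [hBval]
    have hpf : pvExt ti f = true := by
      refine List.of_mem_filter (p := pvExt ti) (l := st) ?_
      rw [hE]; exact List.mem_cons_self
    cases r with
    | nil => simp [pvPhase2]
    | cons x xs =>
      have hmem : ∀ t ∈ x :: xs, (List.lookup "name" t == List.lookup "name" f) = (pvNm t == pvNm f) := by
        intro t ht
        have hpt : pvExt ti t = true := by
          refine List.of_mem_filter (p := pvExt ti) (l := st) ?_
          rw [hE]; exact List.mem_cons_of_mem _ ht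
        rw [pvExt_lookup hpt, pvExt_lookup hpf]
        simp
      unfold pvPhase2
      have hcond : ((f :: x :: xs).length == 0 || (f :: x :: xs).length == 1) = false := by simp
      rw [hcond]
      simp only [Bool.false_eq_true, if_false, List.drop_succ_cons, List.drop_zero]
      have hfold := PySem.List.foldl_append_if
        (fun t => List.lookup "name" t == List.lookup "name" f) id (x :: xs) [f]
      simp only [id_eq, List.map_id] at hfold
      rw [hfold, List.filter_congr hmem]
      simp
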